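-- pv_equiv track=rewrite | github.com/rtviii/tubulinxyz | api/musle_alignment.py | _find_aligned_position
-- ===== SOURCE A (Python) =====
-- from typing import List, Tuple, Dict, Optional
--
-- def _find_aligned_position(original_pos: int, mapping: List[int],
--                          boundary: str) -> Optional[int]:
--     """
--     Find the aligned position corresponding to an original position.
--
--     Args:
--         original_pos: 1-based original sequence position
--         mapping: The alignment mapping from _create_alignment_mapping
--         boundary: 'start' or 'end' - affects how we handle gaps at boundaries
--     """
--     try:
--         # Find all aligned positions that map to this original position
--         aligned_positions = [i for i, orig in enumerate(mapping)
--                            if orig == original_pos]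
--
--         if aligned_positions:
--             # Should only be one, but take the first if multiple
--             return aligned_positions[0] + 1  # Convert to 1-based
--
--         # If no exact match, we need to handle the edge case where the
--         # original position falls in a gapped region
--         if boundary == 'start':
--             # For start boundary, find the first aligned position AFTER the gap
--             for i, orig in enumerate(mapping):
--                 if orig != -1 and orig >= original_pos:
--                     return i + 1  # 1-based
--         else:  # 'end'
--             # For end boundary, find the last aligned position BEFORE the gap
--             for i in range(len(mapping)-1, -1, -1):
--                 if mapping[i] != -1 and mapping[i] <= original_pos:
--                     return i + 1  # 1-based
--
--     except (IndexError, ValueError):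
--         pass
--
--     return None
-- ===== SOURCE B (Python) =====
-- from typing import List, Optional
--
-- def _find_aligned_position(original_pos: int, mapping: List[int],
--                            boundary: str) -> Optional[int]:
--     # One forward pass keeping the first exact match, the first non-gap
--     # column >= original_pos, and the last non-gap column <= original_pos.
--     exact = first_ge = last_le = None
--     for i, orig in enumerate(mapping):
--         if exact is None and orig == original_pos:
--             exact = i
--         if first_ge is None and orig != -1 and orig >= original_pos:
--             first_ge = i
--         if orig != -1 and orig <= original_pos:
--             last_le = i
--     if exact is not None:
--         return exact + 1
--     if boundary == 'start':
--         return first_ge + 1 if first_ge is not None else None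
--     return last_le + 1 if last_le is not None else None
-- ===== Notes on version B (the rewrite author's own statement) =====
-- stated objective: alternative
-- what changed: Replaces the exact-match list comprehension plus a direction-dependent second scan (forward for 'start', backward with indexing for 'end') by a single forward pass over enumerate(mapping) that maintains three candidates (first exact, first non-gap >= pos, last non-gap <= pos) and selects among them afterwards.
import Mathlib
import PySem

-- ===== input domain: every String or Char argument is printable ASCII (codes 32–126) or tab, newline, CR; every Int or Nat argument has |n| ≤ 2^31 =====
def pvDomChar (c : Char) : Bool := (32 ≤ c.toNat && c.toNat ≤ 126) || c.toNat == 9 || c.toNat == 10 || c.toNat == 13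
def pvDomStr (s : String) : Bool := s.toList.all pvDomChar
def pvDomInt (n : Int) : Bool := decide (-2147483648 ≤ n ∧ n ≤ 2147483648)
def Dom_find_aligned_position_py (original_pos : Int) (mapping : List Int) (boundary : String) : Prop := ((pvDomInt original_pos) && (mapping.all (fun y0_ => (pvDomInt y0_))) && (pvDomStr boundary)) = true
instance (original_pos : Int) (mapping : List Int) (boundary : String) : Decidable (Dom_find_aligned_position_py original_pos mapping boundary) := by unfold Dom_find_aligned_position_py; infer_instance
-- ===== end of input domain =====

-- B replaces A's exact-match comprehension plus direction-dependent second scan by one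
-- forward pass that maintains three candidate indices; same behaviour, same O(n) cost.


-- ===== PORT A =====
-- [i for i, orig in enumerate(mapping) if orig == original_pos]
def pvA_comp (pos : Int) : List (Int × Int) → List Int
  | [] => []
  | (i, orig) :: rest =>
      if orig = pos then i :: pvA_comp pos rest else pvA_comp pos rest

-- the 'start' forward loop
def pvA_start (pos : Int) : List (Int × Int) → Option Int
  | [] => none
  | (i, orig) :: rest =>
      if orig ≠ -1 ∧ orig ≥ pos then some (i + 1) else pvA_start pos rest

-- the 'end' loop over range(len(mapping)-1, -1, -1); a pyGet? failure is the
-- caught IndexError (return None) — unreachable since the indices are in range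
def pvA_end (pos : Int) (mapping : List Int) : List Int → Option Int
  | [] => none
  | i :: rest =>
      match PySem.List.pyGet? mapping i with
      | none => none
      | some v => if v ≠ -1 ∧ v ≤ pos then some (i + 1) else pvA_end pos mapping rest

def find_aligned_position_py (original_pos : Int) (mapping : List Int) (boundary : String) : Option Int :=
  let aligned := pvA_comp original_pos (PySem.List.enumerate mapping 0)
  match aligned with
  | a :: _ => some (a + 1)
  | [] =>
      if boundary = "start" then
        pvA_start original_pos (PySem.List.enumerate mapping 0)
      else
        pvA_end original_pos mapping (PySem.List.pyRange ((PySem.List.len mapping) - 1) (-1) (-1))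

-- ===== PORT B =====
-- one step of B's single pass: sticky first exact, sticky first-ge, overwritten last-le
def pvB_step (pos : Int) (st : Option Int × Option Int × Option Int) (p : Int × Int) :
    Option Int × Option Int × Option Int :=
  ⟨(if st.1 = none ∧ p.2 = pos then some p.1 else st.1),
   (if st.2.1 = none ∧ p.2 ≠ -1 ∧ p.2 ≥ pos then some p.1 else st.2.1),
   (if p.2 ≠ -1 ∧ p.2 ≤ pos then some p.1 else st.2.2)⟩

def find_aligned_position_py_alt (original_pos : Int) (mapping : List Int) (boundary : String) : Option Int :=
  let st := (PySem.List.enumerate mapping 0).foldl (pvB_step original_pos) (none, none, none)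
  match st.1 with
  | some j => some (j + 1)
  | none =>
      if boundary = "start" then st.2.1.map (· + 1)
      else st.2.2.map (· + 1)

-- ===== PRECONDITION & SPEC =====
def Spec_find_aligned_position_py (original_pos : Int) (mapping : List Int) (boundary : String) (out : Option Int) : Prop := out = find_aligned_position_py_alt original_pos mapping boundary
instance (original_pos : Int) (mapping : List Int) (boundary : String) (out : Option Int) : Decidable (Spec_find_aligned_position_py original_pos mapping boundary out) := by unfold Spec_find_aligned_position_py; infer_instance

-- ===== CLAIM (what is proved, stated in full; the proofs are below) =====
def Claim_equal_find_aligned_position_py : Prop := ∀ (original_pos : Int) (mapping : List Int) (boundary : String), Dom_find_aligned_position_py original_pos mapping boundary → Spec_find_aligned_position_py original_pos mapping boundary (find_aligned_position_py original_pos mapping boundary)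

-- ===== LEMMAS AND PROOFS =====

-- canonical descriptions of the three candidates
def pvFE (pos i : Int) : List Int → Option Int
  | [] => none
  | x :: xs => if x = pos then some i else pvFE pos (i + 1) xs

def pvFG (pos i : Int) : List Int → Option Int
  | [] => none
  | x :: xs => if x ≠ -1 ∧ x ≥ pos then some i else pvFG pos (i + 1) xs

def pvLL (pos i : Int) : List Int → Option Int
  | [] => none
  | x :: xs =>
      match pvLL pos (i + 1) xs with
      | some j => some j
      | none => if x ≠ -1 ∧ x ≤ pos then some i else none

theorem pvA_comp_head (pos s : Int) (xs : List Int) :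
    (pvA_comp pos (PySem.List.enumerate xs s)).head? = pvFE pos s xs := by
  induction xs generalizing s with
  | nil => simp [PySem.List.enumerate_nil, pvA_comp, pvFE]
  | cons x xs ih =>
      rw [PySem.List.enumerate_cons]
      by_cases h : x = pos <;> simp [pvA_comp, pvFE, h, ih]

theorem pvA_start_eq (pos s : Int) (xs : List Int) :
    pvA_start pos (PySem.List.enumerate xs s) = (pvFG pos s xs).map (· + 1) := by
  induction xs generalizing s with
  | nil => simp [PySem.List.enumerate_nil, pvA_start, pvFG]
  | cons x xs ih =>
      rw [PySem.List.enumerate_cons]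
      by_cases h : x ≠ -1 ∧ x ≥ pos <;> simp [pvA_start, pvFG, h, ih]

theorem pvLL_append (pos i : Int) (xs : List Int) (x : Int) :
    pvLL pos i (xs ++ [x]) =
      if x ≠ -1 ∧ x ≤ pos then some (i + xs.length) else pvLL pos i xs := by
  induction xs generalizing i with
  | nil => simp [pvLL]
  | cons y ys ih =>
      simp only [List.cons_append, pvLL, ih (i + 1)]
      by_cases h : x ≠ -1 ∧ x ≤ pos
      · simp [h]; ring_nf
      · simp [h]

theorem pvA_end_stable (pos : Int) (xs : List Int) (x : Int) (r : List Int)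
    (hr : ∀ i ∈ r, 0 ≤ i ∧ i < (xs.length : Int)) :
    pvA_end pos (xs ++ [x]) r = pvA_end pos xs r := by
  induction r with
  | nil => rfl
  | cons i rest ih =>
      obtain ⟨h0, hlt⟩ := hr i (by simp)
      have hi : i = ((i.toNat : Nat) : Int) := by omega
      have hlen : i.toNat < xs.length := by omega
      have hget : PySem.List.pyGet? (xs ++ [x]) i = PySem.List.pyGet? xs i := by
        rw [hi, PySem.List.pyGet?_natCast, PySem.List.pyGet?_natCast,
          List.getElem?_append_left hlen]
      simp only [pvA_end, hget]
      cases h : PySem.List.pyGet? xs i with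
      | none => rfl
      | some v =>
          by_cases hv : v ≠ -1 ∧ v ≤ pos
          · simp [hv]
          · simp [hv, ih (fun j hj => hr j (by simp [hj]))]

theorem pvA_end_eq (pos : Int) (xs : List Int) :
    pvA_end pos xs (PySem.List.pyRange ((xs.length : Int) - 1) (-1) (-1)) =
      (pvLL pos 0 xs).map (· + 1) := by
  induction xs using List.reverseRecOn with
  | nil => simp [PySem.List.pyRange_neg_one_eq_nil, pvA_end, pvLL]
  | append_singleton xs x ih =>
      have hlen : (((xs ++ [x]).length : Int) - 1) = (xs.length : Int) := by
        simp
      rw [hlen, PySem.List.pyRange_neg_one_cons (by omega)]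
      have hget : PySem.List.pyGet? (xs ++ [x]) ((xs.length : Nat) : Int) = some x := by
        rw [PySem.List.pyGet?_natCast]; simp
      simp only [pvA_end, hget]
      by_cases hv : x ≠ -1 ∧ x ≤ pos
      · simp [hv, pvLL_append]
      · have hr : ∀ i ∈ PySem.List.pyRange ((xs.length : Int) - 1) (-1) (-1),
            0 ≤ i ∧ i < (xs.length : Int) := by
          intro i hi
          rw [PySem.List.mem_pyRange_neg_one] at hi
          omega
        simp only [hv, if_false, pvA_end_stable pos xs x _ hr, ih, pvLL_append]

theorem pvB_fold (pos s : Int) (xs : List Int) (e fg ll : Option Int) :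
    (PySem.List.enumerate xs s).foldl (pvB_step pos) (e, fg, ll) =
      ⟨e.orElse (fun _ => pvFE pos s xs),
       fg.orElse (fun _ => pvFG pos s xs),
       (pvLL pos s xs).orElse (fun _ => ll)⟩ := by
  induction xs generalizing s e fg ll with
  | nil => cases e <;> cases fg <;> simp [PySem.List.enumerate_nil, pvFE, pvFG, pvLL,
      Option.orElse]
  | cons x xs ih =>
      rw [PySem.List.enumerate_cons]
      simp only [List.foldl_cons, pvB_step, ih]
      congr 1
      · cases e with
        | some a => simp [Option.orElse]
        | none =>
            by_cases h : x = pos <;> simp [pvFE, h, Option.orElse]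
      congr 1
      · cases fg with
        | some a => simp [Option.orElse]
        | none =>
            by_cases h : x ≠ -1 ∧ x ≥ pos <;> simp [pvFG, h, Option.orElse]
      · by_cases h : x ≠ -1 ∧ x ≤ pos
        · simp only [pvLL, if_pos h]
          cases hll : pvLL pos (s + 1) xs <;> simp [Option.orElse]
        · simp only [pvLL, if_neg h]
          cases hll : pvLL pos (s + 1) xs <;> simp [Option.orElse]

-- ===== VERDICT (by name: the statement is the Claim_ definition above) =====
theorem find_aligned_position_py_spec : Claim_equal_find_aligned_position_py := by
  intro pos mapping boundary _
  unfold Spec_find_aligned_position_py find_aligned_position_py find_aligned_position_py_alt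
  rw [pvB_fold]
  have hcomp := pvA_comp_head pos 0 mapping
  cases hE : pvFE pos 0 mapping with
  | some a =>
      rw [hE] at hcomp
      obtain ⟨rest, hr⟩ : ∃ rest, pvA_comp pos (PySem.List.enumerate mapping 0) = a :: rest := by
        cases h : pvA_comp pos (PySem.List.enumerate mapping 0) with
        | nil => rw [h] at hcomp; simp at hcomp
        | cons b r => rw [h] at hcomp; simp at hcomp; exact ⟨r, by rw [hcomp]⟩
      simp [hr, Option.orElse]
  | none =>
      rw [hE] at hcomp
      have hnil : pvA_comp pos (PySem.List.enumerate mapping 0) = [] := by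
        cases h : pvA_comp pos (PySem.List.enumerate mapping 0) with
        | nil => rfl
        | cons b r => rw [h] at hcomp; simp at hcomp
      have hend := pvA_end_eq pos mapping
      cases hll : pvLL pos 0 mapping <;>
        simp [hnil, Option.orElse, pvA_start_eq, PySem.List.len_eq, hend, hll]
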